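-- pv_equiv track=rewrite | github.com/abdallahdataguy/Excel_BI_Challenges | Excel_Challenge_417_Split_Alphabets_and_Numbers_V2.py | split_chars
-- ===== SOURCE A (Python) =====
-- def split_chars(col):
--     chars = ''
--     for i in range(len(col) - 1):
--         a = (ord(col[i].upper()) - 48) in range(10)
--         b = (ord(col[i + 1].upper()) - 48) in range(10)
--         if not a == b:
--             chars += col[i] + ', '
--         else:
--             chars += col[i]
--     return chars + col[-1]
-- ===== SOURCE B (Python) =====
-- def split_chars(col):
--     # Run-grouping: split col into maximal runs of equal digit-ness, join with ', '.
--     def isdig(c):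
--         return (ord(c.upper()) - 48) in range(10)
--     def runs(s):
--         if not s:
--             return []
--         i = 1
--         while i < len(s) and isdig(s[i]) == isdig(s[0]):
--             i += 1
--         return [s[:i]] + runs(s[i:])
--     return ', '.join(runs(col))
-- ===== Notes on version B (the rewrite author's own statement) =====
-- stated objective: alternative
-- what changed: Replaces A's index-based pairwise boundary scan (compare each character with its successor, append a comma-space at each digit/non-digit boundary) with a run-grouping pass that splits the string into maximal runs of equal digit-ness and joins the runs with a comma-space separator.
-- outside the precondition, e.g. on split_chars(''): A raises IndexError, B returns ''
-- crash fix: On the empty string A raises IndexError (the trailing col[-1]); B returns the empty string. — e.g. on split_chars(""): A raises IndexError, B returns ""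
import Mathlib
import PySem

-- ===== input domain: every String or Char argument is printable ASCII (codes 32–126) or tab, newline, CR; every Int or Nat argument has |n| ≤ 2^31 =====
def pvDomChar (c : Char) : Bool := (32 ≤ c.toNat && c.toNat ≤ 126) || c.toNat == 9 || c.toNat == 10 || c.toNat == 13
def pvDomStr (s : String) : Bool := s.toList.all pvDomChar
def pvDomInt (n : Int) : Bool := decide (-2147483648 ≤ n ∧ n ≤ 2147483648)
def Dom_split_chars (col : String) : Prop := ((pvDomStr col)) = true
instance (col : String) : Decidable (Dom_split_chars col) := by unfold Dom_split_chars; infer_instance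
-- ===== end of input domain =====

-- B replaces A's pairwise digit/non-digit boundary scan by a run-grouping pass (maximal runs of
-- equal digit-ness joined with ', ') — an alternative decomposition of the same cost; on the empty
-- string A raises IndexError while B returns "" (see Raises_ below).

-- the digit-ness key both Pythons compute: (ord(c.upper()) - 48) in range(10)
def digitKey (c : Char) : Bool :=
  decide (0 ≤ ((PySem.Chars.upperChar c).toNat : Int) - 48 ∧
          ((PySem.Chars.upperChar c).toNat : Int) - 48 < 10)

-- ===== PORT A =====
def split_chars (col : String) : String :=
  let cs := col.toList
  let chars := (PySem.List.pyRange 0 ((cs.length : Int) - 1) 1).foldl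
    (fun chars i =>
      let a := digitKey (PySem.List.pyGetD cs i ' ')
      let b := digitKey (PySem.List.pyGetD cs (i + 1) ' ')
      if !(a == b) then chars ++ ([PySem.List.pyGetD cs i ' '] ++ [',', ' '])
      else chars ++ [PySem.List.pyGetD cs i ' '])
    ([] : List Char)
  String.ofList (chars ++ [PySem.List.pyGetD cs (-1) ' '])

-- ===== PORT B =====
-- runs(s): the maximal runs of equal digit-ness (the while loop is exactly takeWhile/dropWhile
-- of 'digitKey d == digitKey s[0]' on the tail)
def altRuns : List Char → List (List Char)
  | [] => []
  | c :: rest =>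
      (c :: rest.takeWhile (fun d => digitKey d == digitKey c)) ::
        altRuns (rest.dropWhile (fun d => digitKey d == digitKey c))
termination_by l => l.length
decreasing_by
  exact Nat.lt_succ_of_le (List.length_dropWhile_le _ _)

def split_chars_alt (col : String) : String :=
  String.ofList (PySem.Chars.join [',', ' '] (altRuns col.toList))

-- ===== PRECONDITION & SPEC =====
-- Pre_ excludes only the empty string, on which A's trailing col[-1] raises IndexError.
def Pre_split_chars (col : String) : Prop := col.toList ≠ []
instance (col : String) : Decidable (Pre_split_chars col) := by unfold Pre_split_chars; infer_instance
def pvWitness_split_chars : String := "ab12c"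

-- On the empty string A raises IndexError (col[-1]); B returns "".
def Raises_split_chars (col : String) : Prop := col.toList = []
instance (col : String) : Decidable (Raises_split_chars col) := by unfold Raises_split_chars; infer_instance
def pvRaiseWitness_split_chars : String := ""
def pvRaiseWitnessOut_split_chars : String := ""

def Spec_split_chars (col : String) (out : String) : Prop := out = split_chars_alt col
instance (col : String) (out : String) : Decidable (Spec_split_chars col out) := by unfold Spec_split_chars; infer_instance

-- ===== CLAIM (what is proved, stated in full; the proofs are below) =====
def Claim_equal_split_chars : Prop := ∀ (col : String), Dom_split_chars col → Pre_split_chars col → Spec_split_chars col (split_chars col)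
def Claim_raises_split_chars : Prop := (∀ (col : String), Dom_split_chars col → Raises_split_chars col → ¬ Pre_split_chars col) ∧ (Dom_split_chars (pvRaiseWitness_split_chars) ∧ Raises_split_chars (pvRaiseWitness_split_chars) ∧ split_chars_alt (pvRaiseWitness_split_chars) = pvRaiseWitnessOut_split_chars)

-- ===== LEMMAS AND PROOFS =====

-- the piece A appends for the adjacent pair (a, b)
def seg (p : Char × Char) : List Char :=
  if !(digitKey p.1 == digitKey p.2) then [p.1] ++ [',', ' '] else [p.1]

lemma map_pair_eq_zip (cs : List Char) :
    (PySem.List.pyRange 0 ((cs.length : Int) - 1) 1).map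
      (fun i => (PySem.List.pyGetD cs i ' ', PySem.List.pyGetD cs (i + 1) ' ')) =
    cs.zip cs.tail := by
  apply List.ext_getElem
  · simp [PySem.List.length_pyRange_one, List.length_tail]
  · intro k h1 h2
    have hk : k < cs.length - 1 := by
      simp [PySem.List.length_pyRange_one] at h1; omega
    have hlt : k < cs.length := by omega
    have hlt' : k + 1 < cs.length := by omega
    simp only [List.getElem_map, PySem.List.getElem_pyRange_one, List.getElem_zip,
      List.getElem_tail]
    rw [show (0:Int) + (k:Int) = ((k : Nat) : Int) from by omega,
      show (k:Int) + 1 = (((k + 1 : Nat)) : Int) from by push_cast; ring]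
    rw [PySem.List.pyGetD_natCast, PySem.List.pyGetD_natCast,
      List.getD_eq_getElem _ _ hlt, List.getD_eq_getElem _ _ hlt']

-- A's loop is the concatenation of seg over adjacent pairs
lemma split_chars_eq_flatMap (col : String) :
    split_chars col =
      String.ofList ((col.toList.zip col.toList.tail).flatMap seg ++
        [PySem.List.pyGetD col.toList (-1) ' ']) := by
  simp only [split_chars]
  congr 1
  have hbody : ∀ (chars : List Char) (i : Int),
      (fun chars i =>
        let a := digitKey (PySem.List.pyGetD col.toList i ' ')
        let b := digitKey (PySem.List.pyGetD col.toList (i + 1) ' ')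
        if !(a == b) then chars ++ ([PySem.List.pyGetD col.toList i ' '] ++ [',', ' '])
        else chars ++ [PySem.List.pyGetD col.toList i ' ']) chars i =
      chars ++ seg (PySem.List.pyGetD col.toList i ' ', PySem.List.pyGetD col.toList (i + 1) ' ') := by
    intro chars i
    simp only [seg]
    split_ifs <;> simp_all
  calc (PySem.List.pyRange 0 ((col.toList.length : Int) - 1) 1).foldl
        (fun chars i =>
          let a := digitKey (PySem.List.pyGetD col.toList i ' ')
          let b := digitKey (PySem.List.pyGetD col.toList (i + 1) ' ')
          if !(a == b) then chars ++ ([PySem.List.pyGetD col.toList i ' '] ++ [',', ' '])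
          else chars ++ [PySem.List.pyGetD col.toList i ' ']) ([] : List Char) ++
        [PySem.List.pyGetD col.toList (-1) ' ']
      = (PySem.List.pyRange 0 ((col.toList.length : Int) - 1) 1).foldl
          (fun chars i =>
            chars ++ seg (PySem.List.pyGetD col.toList i ' ', PySem.List.pyGetD col.toList (i + 1) ' '))
          ([] : List Char) ++ [PySem.List.pyGetD col.toList (-1) ' '] := by
        congr 1
        exact PySem.List.foldl_congr_mem _ _ _ _ (fun acc x _ => hbody acc x)
    _ = ((PySem.List.pyRange 0 ((col.toList.length : Int) - 1) 1).map
          (fun i => (PySem.List.pyGetD col.toList i ' ', PySem.List.pyGetD col.toList (i + 1) ' '))).foldl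
          (fun chars p => chars ++ seg p) ([] : List Char) ++
          [PySem.List.pyGetD col.toList (-1) ' '] := by
        rw [List.foldl_map]
    _ = (col.toList.zip col.toList.tail).foldl (fun chars p => chars ++ seg p) ([] : List Char) ++
          [PySem.List.pyGetD col.toList (-1) ' '] := by
        rw [map_pair_eq_zip]
    _ = (col.toList.zip col.toList.tail).flatMap seg ++
          [PySem.List.pyGetD col.toList (-1) ' '] := by
        rw [PySem.List.foldl_append_eq_flatMap]
        simp

lemma join_cons_head (sep : List Char) (a : Char) (r : List Char) (rs : List (List Char)) :
    PySem.Chars.join sep ((a :: r) :: rs) = a :: PySem.Chars.join sep (r :: rs) := by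
  cases rs with
  | nil => simp [PySem.Chars.join_singleton]
  | cons q qs => simp [PySem.Chars.join_cons_cons]

-- the main correspondence, by structural induction on the character list
lemma flatMap_zip_eq_join (cs : List Char) (h : cs ≠ []) :
    (cs.zip cs.tail).flatMap seg ++ [cs.getLast h] =
      PySem.Chars.join [',', ' '] (altRuns cs) := by
  induction cs with
  | nil => exact absurd rfl h
  | cons a rest ih =>
    cases rest with
    | nil =>
      simp [altRuns, PySem.Chars.join_singleton, List.getLast]
    | cons b rest2 =>
      have ihr := ih (by simp)
      have hlast : (a :: b :: rest2).getLast h = (b :: rest2).getLast (by simp) := by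
        simp [List.getLast]
      by_cases hk : digitKey b = digitKey a
      · -- same digit-ness: b joins a's run
        have hpb : (digitKey b == digitKey a) = true := by simp [hk]
        have hpred : (fun d => digitKey d == digitKey a) = (fun d => digitKey d == digitKey b) := by
          funext d; rw [hk]
        have hruns : altRuns (a :: b :: rest2) =
            (a :: b :: rest2.takeWhile (fun d => digitKey d == digitKey b)) ::
              altRuns (rest2.dropWhile (fun d => digitKey d == digitKey b)) := by
          rw [altRuns, hpred]
          simp [hk]
        have hseg : seg (a, b) = [a] := by simp [seg, hk]
        rw [hruns, join_cons_head]
        have hrw : PySem.Chars.join [',', ' ']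
            ((b :: rest2.takeWhile (fun d => digitKey d == digitKey b)) ::
              altRuns (rest2.dropWhile (fun d => digitKey d == digitKey b))) =
            PySem.Chars.join [',', ' '] (altRuns (b :: rest2)) := by
          rw [altRuns]
        rw [hrw, ← ihr, hlast]
        simp [List.zip, hseg]
      · -- boundary: a ends its run
        have hpb : (digitKey b == digitKey a) = false := by simp [hk]
        have hpab : (digitKey a == digitKey b) = false := by
          simp; exact fun habs => hk habs.symm
        have hruns : altRuns (a :: b :: rest2) = [a] :: altRuns (b :: rest2) := by
          rw [altRuns]
          simp [hpb]
        have hseg : seg (a, b) = [a, ',', ' '] := by simp [seg, hpab]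
        rw [hruns]
        have hcons : ∃ r rs, altRuns (b :: rest2) = r :: rs := by
          rw [altRuns]; exact ⟨_, _, rfl⟩
        obtain ⟨r, rs, hr⟩ := hcons
        rw [hr, PySem.Chars.join_cons_cons, ← hr, ← ihr, hlast]
        simp [List.zip, hseg]

-- ===== VERDICT (by name: the statement is the Claim_ definition above) =====
theorem split_chars_spec : Claim_equal_split_chars := by
  intro col _ hpre
  unfold Spec_split_chars split_chars_alt
  rw [split_chars_eq_flatMap, PySem.List.pyGetD_neg_one _ _ hpre,
    flatMap_zip_eq_join col.toList hpre]

theorem split_chars_raises : Claim_raises_split_chars := by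
  unfold Claim_raises_split_chars
  exact ⟨fun col _ hr hp => hp hr, by decide, by decide, by simp [split_chars_alt, pvRaiseWitness_split_chars, pvRaiseWitnessOut_split_chars, altRuns, PySem.Chars.join_nil]⟩

-- witness self-check: B's port really returns "" on the raise witness (projection of the theorem above)
theorem split_chars_raises_witness_ok :
    split_chars_alt pvRaiseWitness_split_chars = pvRaiseWitnessOut_split_chars :=
  split_chars_raises.2.2.2
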